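-- pv_equiv track=rewrite | github.com/MagnusKolsjo/mcp-for-diva | mcp_server.py | _bestam_soktyp
-- ===== SOURCE A (Python) =====
-- def _bestam_soktyp(publikationstyper: list[str]) -> str:
--     """Bestämmer DiVA searchtype baserat på begärda publikationstyper."""
--     if not publikationstyper:
--         return "all"
--     undergraduate_typer = {"studentthesis", "examensarbete", "undergraduate"}
--     har_undergraduate = any(p.lower() in undergraduate_typer for p in publikationstyper)
--     har_postgraduate = any(p.lower() not in undergraduate_typer for p in publikationstyper)
--     if har_undergraduate and not har_postgraduate:
--         return "undergraduate"
--     if har_postgraduate and not har_undergraduate: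
--         return "postgraduate"
--     # Blandat — all stöder inte publicationtype-filter men ger bredast täckning
--     return "all"
-- ===== SOURCE B (Python) =====
-- def _bestam_soktyp(publikationstyper: list[str]) -> str:
--     """Bestämmer DiVA searchtype baserat på begärda publikationstyper."""
--     undergraduate_typer = {"studentthesis", "examensarbete", "undergraduate"}
--     it = iter(publikationstyper)
--     try:
--         forsta = next(it).lower() in undergraduate_typer
--     except StopIteration:
--         return "all"
--     for p in it:
--         if (p.lower() in undergraduate_typer) != forsta:
--             # blandad lista — avbryt direkt
--             return "all"
--     return "undergraduate" if forsta else "postgraduate"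
-- ===== Notes on version B (the rewrite author's own statement) =====
-- stated objective: alternative
-- what changed: B replaces A's two full any-scans with a single early-exit pass: it classifies the first element and returns 'all' the moment any later element's classification disagrees, so mixed lists are decided at the first mismatch and the list is traversed at most once.
import Mathlib
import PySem

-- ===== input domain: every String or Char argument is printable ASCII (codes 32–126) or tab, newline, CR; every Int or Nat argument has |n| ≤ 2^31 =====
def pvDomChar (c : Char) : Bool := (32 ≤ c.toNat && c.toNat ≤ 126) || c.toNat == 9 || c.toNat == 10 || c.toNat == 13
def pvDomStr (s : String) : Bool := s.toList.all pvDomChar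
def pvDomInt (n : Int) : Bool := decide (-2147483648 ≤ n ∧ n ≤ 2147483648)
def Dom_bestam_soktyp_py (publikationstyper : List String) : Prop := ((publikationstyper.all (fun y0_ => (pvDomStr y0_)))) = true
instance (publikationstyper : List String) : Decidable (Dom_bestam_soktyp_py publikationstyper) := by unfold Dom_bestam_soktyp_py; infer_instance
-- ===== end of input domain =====

-- ===== PORT A =====
def bestam_soktyp_py (publikationstyper : List String) : String :=
  if publikationstyper = [] then "all"
  else
    let undergraduate_typer : PySem.Set String :=
      PySem.Set.ofList ["studentthesis", "examensarbete", "undergraduate"]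
    let har_undergraduate :=
      publikationstyper.any (fun p => PySem.Set.contains undergraduate_typer (PySem.Str.lower p))
    let har_postgraduate :=
      publikationstyper.any (fun p => !PySem.Set.contains undergraduate_typer (PySem.Str.lower p))
    if har_undergraduate && !har_postgraduate then "undergraduate"
    else if har_postgraduate && !har_undergraduate then "postgraduate"
    else "all"

-- ===== PORT B =====
-- B: classify the first element, then scan the rest once, returning "all" at the first mismatch
def pvCls (p : String) : Bool :=
  PySem.Set.contains
    (PySem.Set.ofList ["studentthesis", "examensarbete", "undergraduate"])
    (PySem.Str.lower p)

-- the for-loop of Source B with its early return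
def pvScan (forsta : Bool) : List String → String
  | [] => if forsta then "undergraduate" else "postgraduate"
  | p :: rest => if pvCls p ≠ forsta then "all" else pvScan forsta rest

def bestam_soktyp_py_alt (publikationstyper : List String) : String :=
  match publikationstyper with
  | [] => "all"
  | x :: xs => pvScan (pvCls x) xs

-- ===== PRECONDITION & SPEC =====
def Spec_bestam_soktyp_py (publikationstyper : List String) (out : String) : Prop := out = bestam_soktyp_py_alt publikationstyper
instance (publikationstyper : List String) (out : String) : Decidable (Spec_bestam_soktyp_py publikationstyper out) := by unfold Spec_bestam_soktyp_py; infer_instance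

-- ===== CLAIM (what is proved, stated in full; the proofs are below) =====
def Claim_equal_bestam_soktyp_py : Prop := ∀ (publikationstyper : List String), Dom_bestam_soktyp_py publikationstyper → Spec_bestam_soktyp_py publikationstyper (bestam_soktyp_py publikationstyper)

-- ===== LEMMAS AND PROOFS =====

-- ===== VERDICT (by name: the statement is the Claim_ definition above) =====
-- the early-exit scan equals "any mismatch against forsta"
theorem pvScan_eq (forsta : Bool) (xs : List String) :
    pvScan forsta xs =
      if xs.any (fun p => pvCls p != forsta) then "all"
      else if forsta then "undergraduate" else "postgraduate" := by
  induction xs with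
  | nil => simp [pvScan]
  | cons p rest ih =>
    by_cases h : pvCls p = forsta
    · simp [pvScan, h, ih]
    · simp [pvScan, h]

-- A's two any-scans on a nonempty list, reduced to "any mismatch against the head's class"
theorem pv_case (f : String → Bool) (x : String) (xs : List String) :
    (if ((x :: xs).any f) && !((x :: xs).any (fun p => !f p)) then "undergraduate"
     else if ((x :: xs).any (fun p => !f p)) && !((x :: xs).any f) then "postgraduate"
     else "all")
    = (if xs.any (fun p => f p != f x) then "all"
       else if f x then "undergraduate" else "postgraduate") := by
  cases hfx : f x
  · have e : (fun p => f p != false) = f := by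
      funext p; cases f p <;> rfl
    rw [e]
    cases h : xs.any f <;> simp [List.any_cons, hfx, h]
  · have e : (fun p => f p != true) = (fun p => !f p) := by
      funext p; cases f p <;> rfl
    rw [e]
    cases h : xs.any (fun p => !f p) <;> simp [List.any_cons, hfx, h]

theorem bestam_soktyp_py_spec : Claim_equal_bestam_soktyp_py := by
  intro l _
  unfold Spec_bestam_soktyp_py
  rcases l with _ | ⟨x, xs⟩
  · rfl
  · show bestam_soktyp_py (x :: xs) = pvScan (pvCls x) xs
    rw [pvScan_eq]
    exact pv_case pvCls x xs
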